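-- pv_equiv track=rewrite | github.com/ElliotSalisbury/winter_hackday | location_mapping/do_cv.py | get_brightest_front_side
-- ===== SOURCE A (Python) =====
-- def get_brightest_front_side(brights):
--     front, f_val = None, 0
--     side, s_val = None, 0
--     for angle_name in brights:
--         if "front" in angle_name or "back" in angle_name:
--             if brights[angle_name] > f_val:
--                 f_val = brights[angle_name]
--                 front = angle_name
--         elif "left" in angle_name or "right" in angle_name:
--             if brights[angle_name] > s_val:
--                 s_val = brights[angle_name]
--                 side = angle_name
--     return [front, side]
-- ===== SOURCE B (Python) =====
-- def get_brightest_front_side(brights):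
--     front_cands = [(k, v) for k, v in brights.items()
--                    if ("front" in k or "back" in k) and v > 0]
--     side_cands = [(k, v) for k, v in brights.items()
--                   if "front" not in k and "back" not in k
--                   and ("left" in k or "right" in k) and v > 0]
--     front = max(front_cands, key=lambda kv: kv[1])[0] if front_cands else None
--     side = max(side_cands, key=lambda kv: kv[1])[0] if side_cands else None
--     return [front, side]
-- ===== Notes on version B (the rewrite author's own statement) =====
-- stated objective: simpler
-- what changed: Replaces the single interleaved loop carrying four mutable variables by two filtered candidate lists (front/back keys and left/right-only keys with positive brightness) followed by max(key=value), which reproduces the >0 floor and the first-wins strict-> tie rule.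
import Mathlib
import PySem

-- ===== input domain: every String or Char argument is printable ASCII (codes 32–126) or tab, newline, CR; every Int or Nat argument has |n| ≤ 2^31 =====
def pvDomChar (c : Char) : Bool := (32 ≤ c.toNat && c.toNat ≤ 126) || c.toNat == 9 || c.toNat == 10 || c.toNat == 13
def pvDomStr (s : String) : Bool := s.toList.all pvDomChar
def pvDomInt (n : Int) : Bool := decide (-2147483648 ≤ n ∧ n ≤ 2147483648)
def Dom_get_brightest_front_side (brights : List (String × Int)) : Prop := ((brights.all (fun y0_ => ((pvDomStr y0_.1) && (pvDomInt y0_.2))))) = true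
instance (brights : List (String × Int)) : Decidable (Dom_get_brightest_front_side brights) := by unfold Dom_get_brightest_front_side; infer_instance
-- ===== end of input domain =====

-- B replaces the interleaved four-variable loop by filter + max per group (objective: simpler).


-- ===== PORT A =====
-- The Python argument is a dict; the assoc list is turned into it with PySem.Dict.ofList,
-- and iterating the keys while looking each one up equals iterating the items.
def get_brightest_front_side (brights : List (String × Int)) : List (Option String) :=
  let d := PySem.Dict.ofList brights
  let r := d.items.foldl
    (fun (st : Option String × Int × Option String × Int) kv =>
      if PySem.Str.isIn "front" kv.1 || PySem.Str.isIn "back" kv.1 then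
        if st.2.1 < kv.2 then (some kv.1, kv.2, st.2.2.1, st.2.2.2) else st
      else if PySem.Str.isIn "left" kv.1 || PySem.Str.isIn "right" kv.1 then
        if st.2.2.2 < kv.2 then (st.1, st.2.1, some kv.1, kv.2) else st
      else st)
    (none, 0, none, 0)
  [r.1, r.2.2.1]

-- ===== PORT B =====
def get_brightest_front_side_alt (brights : List (String × Int)) : List (Option String) :=
  let items := (PySem.Dict.ofList brights).items
  let front_cands := items.filter (fun kv =>
    (PySem.Str.isIn "front" kv.1 || PySem.Str.isIn "back" kv.1) && decide (0 < kv.2))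
  let side_cands := items.filter (fun kv =>
    (!PySem.Str.isIn "front" kv.1 && !PySem.Str.isIn "back" kv.1
      && (PySem.Str.isIn "left" kv.1 || PySem.Str.isIn "right" kv.1)) && decide (0 < kv.2))
  let front := (PySem.List.max? front_cands (fun kv => kv.2)).map (fun kv => kv.1)
  let side := (PySem.List.max? side_cands (fun kv => kv.2)).map (fun kv => kv.1)
  [front, side]

-- ===== PRECONDITION & SPEC =====
def Spec_get_brightest_front_side (brights : List (String × Int)) (out : List (Option String)) : Prop := out = get_brightest_front_side_alt brights
instance (brights : List (String × Int)) (out : List (Option String)) : Decidable (Spec_get_brightest_front_side brights out) := by unfold Spec_get_brightest_front_side; infer_instance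

-- ===== CLAIM (what is proved, stated in full; the proofs are below) =====
def Claim_equal_get_brightest_front_side : Prop := ∀ (brights : List (String × Int)), Dom_get_brightest_front_side brights → Spec_get_brightest_front_side brights (get_brightest_front_side brights)

-- ===== LEMMAS AND PROOFS =====

-- running "strictly greater" update on one group
def pvStep (s : Option String × Int) (kv : String × Int) : Option String × Int :=
  if s.2 < kv.2 then (some kv.1, kv.2) else s

-- the state A's loop carries for one group, seen as max?'s Option accumulator
def pvToSt (acc : Option (String × Int)) : Option String × Int :=
  match acc with | none => (none, 0) | some m => (some m.1, m.2)

theorem pvToSt_fst (acc : Option (String × Int)) :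
    (pvToSt acc).1 = acc.map (fun kv => kv.1) := by
  cases acc <;> rfl

-- A's interleaved loop splits into two independent pvStep folds over the two groups
theorem pvSplit (l : List (String × Int)) (f s : Option String × Int) :
    l.foldl
      (fun (st : Option String × Int × Option String × Int) kv =>
        if PySem.Str.isIn "front" kv.1 || PySem.Str.isIn "back" kv.1 then
          if st.2.1 < kv.2 then (some kv.1, kv.2, st.2.2.1, st.2.2.2) else st
        else if PySem.Str.isIn "left" kv.1 || PySem.Str.isIn "right" kv.1 then
          if st.2.2.2 < kv.2 then (st.1, st.2.1, some kv.1, kv.2) else st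
        else st)
      (f.1, f.2, s.1, s.2)
    = ((l.filter (fun kv => PySem.Str.isIn "front" kv.1 || PySem.Str.isIn "back" kv.1)).foldl pvStep f
        |> fun F =>
       (l.filter (fun kv => !(PySem.Str.isIn "front" kv.1 || PySem.Str.isIn "back" kv.1)
                    && (PySem.Str.isIn "left" kv.1 || PySem.Str.isIn "right" kv.1))).foldl pvStep s
        |> fun S => (F.1, F.2, S.1, S.2)) := by
  induction l generalizing f s with
  | nil => rfl
  | cons kv t ih =>
    simp only [List.foldl_cons, List.filter_cons]
    by_cases hf : (PySem.Str.isIn "front" kv.1 || PySem.Str.isIn "back" kv.1) = true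
    · simp only [hf, if_true, Bool.not_true, Bool.false_and]
      by_cases hv : f.2 < kv.2
      · simpa [pvStep, hv] using ih (some kv.1, kv.2) s
      · simpa [pvStep, hv] using ih f s
    · simp only [Bool.not_eq_true] at hf
      simp only [hf, Bool.not_false, Bool.true_and]
      by_cases hl : (PySem.Str.isIn "left" kv.1 || PySem.Str.isIn "right" kv.1) = true
      · simp only [hl, if_true]
        by_cases hv : s.2 < kv.2
        · simpa [pvStep, hv] using ih f (some kv.1, kv.2)
        · simpa [pvStep, hv] using ih f s
      · simp only [Bool.not_eq_true] at hl
        simp only [hl]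
        exact ih f s

-- one group's pvStep fold, started on a positive best, is max? with that best prepended
theorem pvMaxAux (l : List (String × Int)) : ∀ (m : String × Int), 0 < m.2 →
    l.foldl pvStep (some m.1, m.2)
    = pvToSt (PySem.List.max? (m :: l.filter (fun kv => decide (0 < kv.2))) (fun kv => kv.2)) := by
  induction l with
  | nil => intro m _; simp [PySem.List.max?, pvToSt]
  | cons kv t ih =>
    intro m hm
    simp only [List.foldl_cons, List.filter_cons]
    by_cases hp : (0 : Int) < kv.2
    · by_cases hlt : m.2 < kv.2
      · rw [show pvStep (some m.1, m.2) kv = (some kv.1, kv.2) from by simp [pvStep, hlt]]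
        rw [ih kv hp]
        simp [PySem.List.max?, hp, hlt]
      · rw [show pvStep (some m.1, m.2) kv = (some m.1, m.2) from by simp [pvStep, hlt]]
        rw [ih m hm]
        simp [PySem.List.max?, hp, hlt]
    · have hlt : ¬ m.2 < kv.2 := by omega
      rw [show pvStep (some m.1, m.2) kv = (some m.1, m.2) from by simp [pvStep, hlt]]
      rw [ih m hm]
      simp [PySem.List.max?, hp]

-- from the initial (None, 0) state the loop is exactly max? of the positive-valued elements
theorem pvMaxNone (l : List (String × Int)) :
    l.foldl pvStep (pvToSt none)
    = pvToSt (PySem.List.max? (l.filter (fun kv => decide (0 < kv.2))) (fun kv => kv.2)) := by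
  induction l with
  | nil => rfl
  | cons kv t ih =>
    simp only [List.foldl_cons, List.filter_cons]
    by_cases hp : (0 : Int) < kv.2
    · rw [show pvStep (pvToSt none) kv = (some kv.1, kv.2) from by simp [pvStep, pvToSt, hp]]
      rw [pvMaxAux t kv hp]
      simp [hp]
    · rw [show pvStep (pvToSt none) kv = pvToSt none from by simp [pvStep, pvToSt, hp]]
      rw [ih]
      simp [hp]

-- ===== VERDICT (by name: the statement is the Claim_ definition above) =====
theorem get_brightest_front_side_spec : Claim_equal_get_brightest_front_side := by
  intro brights _
  unfold Spec_get_brightest_front_side get_brightest_front_side get_brightest_front_side_alt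
  simp only []
  rw [show ((none, 0, none, 0) : Option String × Int × Option String × Int)
        = ((pvToSt none).1, (pvToSt none).2, (pvToSt none).1, (pvToSt none).2) from rfl]
  rw [pvSplit]
  simp only [pvMaxNone, pvToSt_fst, List.filter_filter, Bool.not_or, Bool.and_assoc]
  have hf : List.filter (fun a : String × Int => decide (0 < a.2) && (PySem.Str.isIn "front" a.1 || PySem.Str.isIn "back" a.1)) (PySem.Dict.ofList brights).items
      = List.filter (fun a : String × Int => (PySem.Str.isIn "front" a.1 || PySem.Str.isIn "back" a.1) && decide (0 < a.2)) (PySem.Dict.ofList brights).items :=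
    List.filter_congr (fun kv _ => Bool.and_comm _ _)
  have hs : List.filter (fun a : String × Int => decide (0 < a.2) && (!PySem.Str.isIn "front" a.1 && (!PySem.Str.isIn "back" a.1 && (PySem.Str.isIn "left" a.1 || PySem.Str.isIn "right" a.1)))) (PySem.Dict.ofList brights).items
      = List.filter (fun a : String × Int => !PySem.Str.isIn "front" a.1 && (!PySem.Str.isIn "back" a.1 && ((PySem.Str.isIn "left" a.1 || PySem.Str.isIn "right" a.1) && decide (0 < a.2)))) (PySem.Dict.ofList brights).items :=
    List.filter_congr (fun kv _ => by
      cases PySem.Str.isIn "front" kv.1 <;> cases PySem.Str.isIn "back" kv.1 <;>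
        cases PySem.Str.isIn "left" kv.1 <;> cases PySem.Str.isIn "right" kv.1 <;>
        simp [Bool.and_comm])
  rw [hf, hs]
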